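-- pv_equiv track=rewrite | github.com/dg-i/junoscfg | src/junoscfg/input.py | _unify_square_brackets
-- ===== SOURCE A (Python) =====
-- def _unify_square_brackets(text: str) -> str:
--     """Join lines split across [ ] brackets into single lines."""
--     lines: list[str] = []
--     open_brackets = 0
--
--     for line in text.split("\n"):
--         if open_brackets < 0:
--             raise ValueError(f"Invalid statement: {line}")
--
--         if open_brackets == 0:
--             lines.append(line)
--         else:
--             lines[-1] += " " + line
--
--         open_brackets += _count_unquoted_brackets(line)
--
--     if open_brackets > 0:
--         raise ValueError("Unclosed bracket")
--
--     return "\n".join(lines)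
--
-- def _count_unquoted_brackets(line: str) -> int:
--     """Count net unquoted brackets (opens minus closes) in a line."""
--     count = 0
--     in_quote = False
--     for i, ch in enumerate(line):
--         if ch == '"' and (i == 0 or line[i - 1] != "\\"):
--             in_quote = not in_quote
--         elif not in_quote:
--             if ch == "[":
--                 count += 1
--             elif ch == "]":
--                 count -= 1
--     return count
-- ===== SOURCE B (Python) =====
-- def _unify_square_brackets(text: str) -> str:
--     """Join lines split across [ ] brackets into single lines."""
--     lines = text.split("\n")
--
--     # per-line net unquoted-bracket delta (quote/escape aware, tracking the previous char)
--     deltas = []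
--     for line in lines:
--         count = 0
--         in_quote = False
--         prev = None
--         for ch in line:
--             if ch == '"' and prev != "\\":
--                 in_quote = not in_quote
--             elif not in_quote:
--                 count += (ch == "[") - (ch == "]")
--             prev = ch
--         deltas.append(count)
--
--     # cumulative nesting depth entering each line
--     before = []
--     depth = 0
--     for d in deltas:
--         before.append(depth)
--         depth += d
--
--     for lvl, line in zip(before, lines):
--         if lvl < 0:
--             raise ValueError(f"Invalid statement: {line}")
--
--     # group: a new group starts at depth 0, otherwise the line continues the last one
--     groups = []
--     for lvl, line in zip(before, lines):
--         if lvl == 0: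
--             groups.append([line])
--         else:
--             groups[-1].append(line)
--
--     if depth > 0:
--         raise ValueError("Unclosed bracket")
--
--     return "\n".join(" ".join(g) for g in groups)
-- ===== Notes on version B (the rewrite author's own statement) =====
-- stated objective: alternative
-- what changed: Replaces A's single stateful pass (raise-on-underflow, append-or-extend-last-string, per-char index lookback) by a table-driven pipeline: a per-line delta table via a previous-char-tracking scan, a prefix-sum list of cumulative depths, a separate underflow check, and a grouping pass that collects lines into lists joined only at the end.
import Mathlib
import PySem

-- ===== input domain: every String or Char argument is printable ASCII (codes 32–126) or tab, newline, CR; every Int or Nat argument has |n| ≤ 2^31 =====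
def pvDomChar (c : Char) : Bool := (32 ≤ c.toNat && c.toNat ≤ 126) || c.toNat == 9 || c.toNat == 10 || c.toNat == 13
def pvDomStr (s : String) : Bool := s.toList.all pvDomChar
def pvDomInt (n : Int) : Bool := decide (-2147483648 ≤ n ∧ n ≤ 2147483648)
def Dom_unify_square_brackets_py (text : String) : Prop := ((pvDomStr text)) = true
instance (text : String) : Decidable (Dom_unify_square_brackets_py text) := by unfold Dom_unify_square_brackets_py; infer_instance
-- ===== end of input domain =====

-- B restructures A's single stateful pass into a table-driven pipeline (per-line deltas, prefix
-- sums, list grouping joined at the end); alternative decomposition, same cost. Where Python A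
-- raises ValueError (excluded by Pre_) both ports return "".

-- ===== PORT A =====
-- inner loop of _count_unquoted_brackets: state (count, in_quote); char at index i, lookback line[i-1]
def pvStepA (cs : List Char) (st : Int × Bool) (p : Int × Char) : Int × Bool :=
  if p.2 = '"' ∧ (p.1 = 0 ∨ PySem.List.pyGet? cs (p.1 - 1) ≠ some '\\') then (st.1, !st.2)
  else if st.2 = false then
    (if p.2 = '[' then st.1 + 1 else if p.2 = ']' then st.1 - 1 else st.1, st.2)
  else st

-- _count_unquoted_brackets(line)
def pvCountA (line : String) : Int :=
  let cs := line.toList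
  ((PySem.List.enumerate cs).foldl (pvStepA cs) (0, false)).1

-- A's main for-loop: state (lines, open_brackets); none = raise ValueError(Invalid statement)
def pvALoop (acc : List String) (ob : Int) : List String → Option (List String × Int)
  | [] => some (acc, ob)
  | line :: rest =>
    if ob < 0 then none
    else if ob = 0 then pvALoop (acc ++ [line]) (ob + pvCountA line) rest
    else pvALoop (acc.dropLast ++ [acc.getLast?.getD "" ++ " " ++ line]) (ob + pvCountA line) rest

def unify_square_brackets_py (text : String) : String :=
  let lines := (PySem.Str.split? text "\n").getD []       -- sep ≠ "", so split? is some
  match pvALoop [] 0 lines with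
  | none => ""                                            -- raise ValueError(Invalid statement): outside Pre_
  | some (acc, ob) => if ob > 0 then ""                   -- raise ValueError(Unclosed bracket): outside Pre_
                      else PySem.Str.join "\n" acc

-- ===== PORT B =====
-- B's delta scan: state (count, in_quote, prev)
def pvStepB (st : Int × Bool × Option Char) (ch : Char) : Int × Bool × Option Char :=
  if ch = '"' ∧ st.2.2 ≠ some '\\' then (st.1, !st.2.1, some ch)
  else if st.2.1 = false then
    (st.1 + (if ch = '[' then 1 else 0) - (if ch = ']' then 1 else 0), st.2.1, some ch)
  else (st.1, st.2.1, some ch)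

def pvCountB (line : String) : Int :=
  (line.toList.foldl pvStepB (0, false, none)).1

-- deltas = the per-line delta table
def pvDeltas : List String → List Int
  | [] => []
  | l :: ls => pvCountB l :: pvDeltas ls

-- cumulative nesting depth entering each line, plus the final depth
def pvBefore (depth : Int) : List Int → List Int × Int
  | [] => ([], depth)
  | d :: ds => let r := pvBefore (depth + d) ds; (depth :: r.1, r.2)

-- grouping pass over zip(before, lines)
def pvGroups (gs : List (List String)) : List (Int × String) → List (List String)
  | [] => gs
  | (lvl, line) :: rest =>
    if lvl = 0 then pvGroups (gs ++ [[line]]) rest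
    else pvGroups (gs.dropLast ++ [gs.getLast?.getD [] ++ [line]]) rest

def unify_square_brackets_py_alt (text : String) : String :=
  let lines := (PySem.Str.split? text "\n").getD []
  let deltas := pvDeltas lines
  let bd := pvBefore 0 deltas
  if (bd.1.zip lines).any (fun p => decide (p.1 < 0)) then ""   -- raise ValueError(Invalid statement)
  else
    let groups := pvGroups [] (bd.1.zip lines)
    if bd.2 > 0 then ""                                         -- raise ValueError(Unclosed bracket)
    else PySem.Str.join "\n" (groups.map (fun g => PySem.Str.join " " g))

-- ===== PRECONDITION & SPEC =====
-- independent (port-free) per-line net-unquoted-bracket delta, used only to state Pre_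
def pvDelta : List Char → Option Char → Bool → Int → Int
  | [], _, _, n => n
  | c :: cs, prev, inq, n =>
    if c = '"' ∧ prev ≠ some '\\' then pvDelta cs (some c) (!inq) n
    else if inq then pvDelta cs (some c) inq n
    else pvDelta cs (some c) inq (n + (if c = '[' then 1 else 0) - (if c = ']' then 1 else 0))

-- Pre_ excludes exactly the inputs where Python A raises ValueError: a line preceded by more
-- unquoted closing than opening square brackets (underflow), or a positive final balance (unclosed).
def Pre_unify_square_brackets_py (text : String) : Prop :=
  let ds := (PySem.Chars.splitOn text.toList ['\n']).map (fun l => pvDelta l none false 0)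
  (∀ i < ds.length, 0 ≤ (ds.take i).sum) ∧ ds.sum ≤ 0
instance (text : String) : Decidable (Pre_unify_square_brackets_py text) := by
  unfold Pre_unify_square_brackets_py; infer_instance

def pvWitness_unify_square_brackets_py : String := "groups [ a\nb ]\nhost \"[x\""

def Spec_unify_square_brackets_py (text : String) (out : String) : Prop := out = unify_square_brackets_py_alt text
instance (text : String) (out : String) : Decidable (Spec_unify_square_brackets_py text out) := by unfold Spec_unify_square_brackets_py; infer_instance

-- ===== CLAIM (what is proved, stated in full; the proofs are below) =====
def Claim_equal_unify_square_brackets_py : Prop := ∀ (text : String), Dom_unify_square_brackets_py text → Pre_unify_square_brackets_py text → Spec_unify_square_brackets_py text (unify_square_brackets_py text)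

-- ===== LEMMAS AND PROOFS =====

theorem pvWitness_ok :
    Dom_unify_square_brackets_py pvWitness_unify_square_brackets_py ∧
    Pre_unify_square_brackets_py pvWitness_unify_square_brackets_py := by decide

-- the two delta scans agree: index-lookback step (A) = previous-char-tracking step (B)
theorem step_eq (full : List Char) (k : Nat) (c : Char) (hk : full[k]? = some c)
    (cnt : Int) (q : Bool) :
    pvStepB (cnt, q, if k = 0 then none else full[k-1]?) c
      = ((pvStepA full (cnt, q) ((k : Int), c)).1, (pvStepA full (cnt, q) ((k : Int), c)).2, some c) := by
  have hcond : (c = '"' ∧ (if k = 0 then none else full[k-1]?) ≠ some '\\')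
      ↔ (c = '"' ∧ ((k : Int) = 0 ∨ PySem.List.pyGet? full ((k : Int) - 1) ≠ some '\\')) := by
    cases k with
    | zero => simp
    | succ k' =>
      have h2 : ((k' + 1 : Nat) : Int) - 1 = ((k' : Nat) : Int) := by push_cast; ring
      simp [PySem.List.pyGet?_natCast]
      intro _ hco
      exfalso; omega
  simp only [pvStepA, pvStepB]
  by_cases h : c = '"' ∧ (if k = 0 then none else full[k-1]?) ≠ some '\\'
  · rw [if_pos h, if_pos (hcond.mp h)]
  · rw [if_neg h, if_neg (fun hh => h (hcond.mpr hh))]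
    by_cases hq : q = false <;> simp [hq]
    split_ifs <;> simp_all

theorem count_gen (full : List Char) : ∀ (suf : List Char) (k : Nat), full.drop k = suf →
    ∀ (cnt : Int) (q : Bool),
    (PySem.List.enumerate suf (k : Int)).foldl (pvStepA full) (cnt, q)
      = ((suf.foldl pvStepB (cnt, q, if k = 0 then none else full[k-1]?)).1,
         (suf.foldl pvStepB (cnt, q, if k = 0 then none else full[k-1]?)).2.1) := by
  intro suf
  induction suf with
  | nil => intro k h cnt q; simp [PySem.List.enumerate]
  | cons c suf' ih =>
    intro k h cnt q
    have hk : full[k]? = some c := by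
      have h0 := congrArg (fun (l : List Char) => l[0]?) h
      simpa [List.getElem?_drop] using h0
    have hdrop : full.drop (k + 1) = suf' := by
      have : full.drop (k+1) = (full.drop k).drop 1 := by rw [List.drop_drop]
      simp [this, h]
    simp only [PySem.List.enumerate_cons, List.foldl_cons]
    have cast1 : (k : Int) + 1 = ((k + 1 : Nat) : Int) := by push_cast; ring
    rw [cast1, ih (k + 1) hdrop]
    rw [step_eq full k c hk cnt q]
    have : (if k + 1 = 0 then (none : Option Char) else full[k + 1 - 1]?) = some c := by
      simp [hk]
    rw [this]

theorem countA_eq_countB (line : String) : pvCountA line = pvCountB line := by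
  unfold pvCountA pvCountB
  have h := count_gen line.toList line.toList 0 (by simp) 0 false
  simpa using congrArg Prod.fst h

theorem pvDeltas_eq (ls : List String) : pvDeltas ls = ls.map pvCountA := by
  induction ls with
  | nil => rfl
  | cons l ls ih => simp [pvDeltas, ih, countA_eq_countB]

-- bookkeeping for B's pipeline
def pvOk : Int → List Int → Bool
  | _, [] => true
  | t, d :: ds => !decide (t < 0) && pvOk (t + d) ds

theorem pvBefore_snd (ds : List Int) : ∀ t, (pvBefore t ds).2 = t + ds.sum := by
  induction ds with
  | nil => simp [pvBefore]
  | cons d ds ih => intro t; simp [pvBefore, ih]; ring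

theorem pvAny_eq (ds : List Int) : ∀ (ls : List String) (t : Int), ds.length = ls.length →
    (((pvBefore t ds).1).zip ls).any (fun p => decide (p.1 < 0)) = !pvOk t ds := by
  induction ds with
  | nil => intro ls t h; simp [pvBefore, pvOk]
  | cons d ds ih =>
    intro ls t h
    cases ls with
    | nil => simp at h
    | cons l ls =>
      simp only [pvBefore, pvOk, List.zip_cons_cons, List.any_cons]
      rw [ih ls (t + d) (by simpa using h)]
      by_cases ht : t < 0 <;> simp [ht]

-- string-building lemmas
theorem pvStrExt {s t : String} (h : s.toList = t.toList) : s = t := by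
  have := congrArg String.ofList h; simpa using this

theorem sjoin_nonempty_chars (sep p : List Char) : ∀ (parts : List (List Char)), parts ≠ [] →
    PySem.Chars.join sep (parts ++ [p]) = PySem.Chars.join sep parts ++ sep ++ p := by
  intro parts
  induction parts with
  | nil => intro h; exact absurd rfl h
  | cons x rest ih =>
    intro _
    cases rest with
    | nil => simp [PySem.Chars.join_cons_cons, PySem.Chars.join_singleton]
    | cons y rest' =>
      simp only [List.cons_append]
      rw [PySem.Chars.join_cons_cons, PySem.Chars.join_cons_cons sep x y rest']
      rw [show y :: (rest' ++ [p]) = y :: rest' ++ [p] from rfl, ih (by simp)]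
      simp [List.append_assoc]

theorem sjoin_singleton (l : String) : PySem.Str.join " " [l] = l := by
  apply pvStrExt
  simp [PySem.Str.toList_join, PySem.Chars.join_singleton]

theorem sjoin_snoc (g : List String) (hg : g ≠ []) (l : String) :
    PySem.Str.join " " (g ++ [l]) = PySem.Str.join " " g ++ " " ++ l := by
  apply pvStrExt
  simp only [PySem.Str.toList_join, List.map_append, List.map_cons, List.map_nil,
    String.toList_append]
  rw [sjoin_nonempty_chars _ _ _ (by simpa using hg)]

-- the main invariant: A's loop on the joined groups = B's pipeline on the group lists
theorem main_loop (ls : List String) : ∀ (acc : List (List String)) (ob : Int),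
    (ob = 0 ∨ (acc ≠ [] ∧ acc.getLast?.getD [] ≠ [])) →
    pvALoop (acc.map (fun g => PySem.Str.join " " g)) ob ls
      = if pvOk ob (ls.map pvCountA)
        then some ((pvGroups acc (((pvBefore ob (ls.map pvCountA)).1).zip ls)).map (fun g => PySem.Str.join " " g),
                   ob + (ls.map pvCountA).sum)
        else none := by
  induction ls with
  | nil => intro acc ob _; simp [pvALoop, pvOk, pvBefore, pvGroups]
  | cons l ls ih =>
    intro acc ob hinv
    by_cases hneg : ob < 0
    · simp [pvALoop, hneg, pvOk]
    · by_cases h0 : ob = 0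
      · have hstep : (acc.map (fun g => PySem.Str.join " " g)) ++ [l]
            = (acc ++ [[l]]).map (fun g => PySem.Str.join " " g) := by
          simp [sjoin_singleton]
        rw [show pvALoop (acc.map (fun g => PySem.Str.join " " g)) ob (l :: ls)
              = pvALoop ((acc.map (fun g => PySem.Str.join " " g)) ++ [l]) (ob + pvCountA l) ls from by
            simp [pvALoop, h0]]
        rw [hstep, ih (acc ++ [[l]]) (ob + pvCountA l) (Or.inr ⟨by simp, by simp⟩)]
        simp [pvOk, pvBefore, pvGroups, h0, List.sum_cons]
      · obtain ⟨hne, hlast⟩ := hinv.resolve_left h0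
        obtain ⟨g, hg⟩ : ∃ g, acc.getLast? = some g := by
          cases hgl : acc.getLast? with
          | none => exact absurd (List.getLast?_eq_none_iff.mp hgl) hne
          | some g => exact ⟨g, rfl⟩
        have hgne : g ≠ [] := by simpa [hg] using hlast
        have hstep : ((acc.map (fun g => PySem.Str.join " " g)).dropLast
              ++ [(acc.map (fun g => PySem.Str.join " " g)).getLast?.getD "" ++ " " ++ l])
            = (acc.dropLast ++ [g ++ [l]]).map (fun g => PySem.Str.join " " g) := by
          rw [List.getLast?_map, hg]
          simp only [Option.map_some, Option.getD_some, List.map_append, List.map_cons,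
            List.map_nil, List.map_dropLast]
          rw [sjoin_snoc g hgne l]
        rw [show pvALoop (acc.map (fun g => PySem.Str.join " " g)) ob (l :: ls)
              = pvALoop ((acc.map (fun g => PySem.Str.join " " g)).dropLast
                  ++ [(acc.map (fun g => PySem.Str.join " " g)).getLast?.getD "" ++ " " ++ l])
                  (ob + pvCountA l) ls from by
            simp [pvALoop, hneg, h0]]
        rw [hstep, ih (acc.dropLast ++ [g ++ [l]]) (ob + pvCountA l)
          (Or.inr ⟨by simp, by simp [hgne]⟩)]
        simp [pvOk, pvBefore, pvGroups, h0, hneg, hg, List.sum_cons, add_assoc]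

-- ===== VERDICT (by name: the statement is the Claim_ definition above) =====
theorem unify_square_brackets_py_spec : Claim_equal_unify_square_brackets_py := by
  intro text _ _
  unfold Spec_unify_square_brackets_py unify_square_brackets_py unify_square_brackets_py_alt
  dsimp only
  have hB : pvDeltas ((PySem.Str.split? text "\n").getD [])
      = ((PySem.Str.split? text "\n").getD []).map pvCountA := pvDeltas_eq _
  set lines := (PySem.Str.split? text "\n").getD [] with hlines
  rw [hB]
  have hmain := main_loop lines [] 0 (Or.inl rfl)
  simp only [List.map_nil] at hmain
  rw [hmain]
  rw [pvAny_eq (lines.map pvCountA) lines 0 (by simp), pvBefore_snd]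
  cases hok : pvOk 0 (lines.map pvCountA) with
  | false => simp
  | true => simp
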